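-- pv_equiv track=rewrite | github.com/lukszi/PolygonDataset | src/polygon_dataset/utils/chunking.py | distribute_work
-- ===== SOURCE A (Python) =====
-- from typing import List, Tuple
--
-- def distribute_work(total_items: int, num_processes: int) -> List[Tuple[int, int]]:
--     """Divide work evenly among processes."""
--     batch_size = total_items // num_processes
--     remainder = total_items % num_processes
--
--     distribution = []
--     for i in range(num_processes):
--         start = i * batch_size + min(i, remainder)
--         end = min((i + 1) * batch_size + min(i + 1, remainder), total_items)
--         if end > start:
--             distribution.append((start, end))
--
--     return distribution
-- ===== SOURCE B (Python) =====
-- def distribute_work(total_items: int, num_processes: int):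
--     """Divide work evenly among processes (recursive divide-and-conquer)."""
--     def go(start, items, procs):
--         if procs <= 0:
--             return []
--         if procs == 1:
--             return [(start, start + items)] if items > 0 else []
--         half = procs // 2
--         q, r = divmod(items, procs)
--         left_items = half * q + min(half, r)
--         return (go(start, left_items, half)
--                 + go(start + left_items, items - left_items, procs - half))
--     return go(0, total_items, num_processes)
-- ===== Notes on version B (the rewrite author's own statement) =====
-- stated objective: alternative
-- what changed: Replaces A's index loop with closed-form per-chunk endpoints by a recursive divide-and-conquer: split the processes in half, split the items fairly between the halves via one divmod, and recurse, emitting each chunk at a single-process leaf (correct because the fair split composes: the sub-divmods reproduce exactly the global boundaries i*q+min(i,r)).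
import Mathlib
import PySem

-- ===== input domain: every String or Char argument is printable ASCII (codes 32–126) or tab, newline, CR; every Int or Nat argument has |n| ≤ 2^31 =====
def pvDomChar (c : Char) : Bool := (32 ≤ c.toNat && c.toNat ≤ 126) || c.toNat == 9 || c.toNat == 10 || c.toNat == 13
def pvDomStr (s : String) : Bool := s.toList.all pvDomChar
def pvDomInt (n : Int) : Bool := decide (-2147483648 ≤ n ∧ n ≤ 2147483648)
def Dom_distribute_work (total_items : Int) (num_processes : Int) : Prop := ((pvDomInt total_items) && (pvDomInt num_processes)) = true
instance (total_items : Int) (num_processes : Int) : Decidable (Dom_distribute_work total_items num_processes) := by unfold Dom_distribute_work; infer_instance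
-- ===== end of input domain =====

-- B replaces A's closed-form index loop by a recursive divide-and-conquer that splits
-- the processes in half and the items fairly between the halves (alternative algorithm).


-- ===== PORT A =====
def distribute_work (total_items : Int) (num_processes : Int) : List (Int × Int) :=
  let batch_size := PySem.Int.floordiv total_items num_processes
  let remainder := PySem.Int.mod total_items num_processes
  (PySem.List.pyRange 0 num_processes 1).foldl
    (fun distribution i =>
      let start := i * batch_size + min i remainder
      let «end» := min ((i + 1) * batch_size + min (i + 1) remainder) total_items
      if «end» > start then distribution ++ [(start, «end»)] else distribution)
    []

-- ===== PORT B =====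
-- termination: for procs ≥ 2, both procs//2 and procs - procs//2 are in [1, procs-1]
def dwGo (start items procs : Int) : List (Int × Int) :=
  if _h0 : procs ≤ 0 then []
  else if _h1 : procs = 1 then (if items > 0 then [(start, start + items)] else [])
  else
    let half := PySem.Int.floordiv procs 2
    let q := PySem.Int.floordiv items procs
    let r := PySem.Int.mod items procs
    let left_items := half * q + min half r
    dwGo start left_items half ++
      dwGo (start + left_items) (items - left_items) (procs - half)
termination_by procs.toNat
decreasing_by
  · have h2 : (2:Int) ≤ procs := by omega
    have := PySem.Int.floordiv_eq_ediv_of_pos (a := procs) (b := 2) (by omega)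
    have h1 : 1 ≤ procs / 2 := by omega
    have h3 : procs / 2 < procs := by omega
    simp only [this]; omega
  · have h2 : (2:Int) ≤ procs := by omega
    have := PySem.Int.floordiv_eq_ediv_of_pos (a := procs) (b := 2) (by omega)
    have h1 : 1 ≤ procs / 2 := by omega
    simp only [this]; omega

def distribute_work_alt (total_items : Int) (num_processes : Int) : List (Int × Int) :=
  dwGo 0 total_items num_processes

-- ===== PRECONDITION & SPEC =====
-- Pre_ excludes exactly num_processes = 0, where A raises ZeroDivisionError.
def Pre_distribute_work (total_items : Int) (num_processes : Int) : Prop := num_processes ≠ 0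
instance (total_items : Int) (num_processes : Int) : Decidable (Pre_distribute_work total_items num_processes) := by unfold Pre_distribute_work; infer_instance
def pvWitness_distribute_work : Int × Int := (10, 3)

def Spec_distribute_work (total_items : Int) (num_processes : Int) (out : List (Int × Int)) : Prop := out = distribute_work_alt total_items num_processes
instance (total_items : Int) (num_processes : Int) (out : List (Int × Int)) : Decidable (Spec_distribute_work total_items num_processes out) := by unfold Spec_distribute_work; infer_instance

-- ===== CLAIM =====
def Claim_equal_distribute_work : Prop := ∀ (total_items : Int) (num_processes : Int), Dom_distribute_work total_items num_processes → Pre_distribute_work total_items num_processes → Spec_distribute_work total_items num_processes (distribute_work total_items num_processes)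

-- ===== LEMMAS AND PROOFS =====

-- the global chunk boundary: bnd q r j = j*q + min j r
def pvBnd (q r j : Int) : Int := j * q + min j r

-- uniqueness of floordiv/mod for a positive divisor
theorem pv_divmod_unique (m p q r : Int) (hp : 0 < p) (h : m = q * p + r)
    (h0 : 0 ≤ r) (h1 : r < p) :
    PySem.Int.floordiv m p = q ∧ PySem.Int.mod m p = r := by
  have hd : m / p = q := by
    rw [h, add_comm, Int.add_mul_ediv_right r q (by omega : p ≠ 0)]
    rw [Int.ediv_eq_zero_of_lt h0 h1]; ring
  have hm : m % p = r := by
    rw [Int.emod_def, hd, h]; ring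
  exact ⟨by rw [PySem.Int.floordiv_eq_ediv_of_pos hp, hd],
         by rw [PySem.Int.mod_eq_emod_of_pos hp, hm]⟩

-- characterization of dwGo: it produces exactly the nonempty global chunks, shifted by start
theorem pv_dwGo_char (P : Nat) (hP : 1 ≤ P) (s m : Int) :
    dwGo s m P =
      ((List.range P).map (fun (j : Nat) =>
          (s + pvBnd (PySem.Int.floordiv m P) (PySem.Int.mod m P) (j:Int),
           s + pvBnd (PySem.Int.floordiv m P) (PySem.Int.mod m P) ((j:Int) + 1)))).filter
        (fun pr => pr.1 < pr.2) := by
  induction P using Nat.strong_induction_on generalizing s m with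
  | _ P ih =>
  rcases Nat.lt_or_ge P 2 with hP2 | hP2
  · -- P = 1
    have hP1 : P = 1 := by omega
    subst hP1
    have hq : PySem.Int.floordiv m 1 = m := by
      rw [PySem.Int.floordiv_eq_ediv_of_pos (by omega)]; simp
    have hr : PySem.Int.mod m 1 = 0 := by
      rw [PySem.Int.mod_eq_emod_of_pos (by omega)]; simp
    rw [dwGo]
    simp only [hq, hr]
    by_cases hm : m > 0 <;>
      simp [hm, pvBnd, List.filter, min_eq_right, List.range_one, hq, hr] <;> omega
  · -- P ≥ 2
    have hPpos : (0:Int) < (P:Int) := by exact_mod_cast hP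
    set q := PySem.Int.floordiv m (P:Int) with hqdef
    set r := PySem.Int.mod m (P:Int) with hrdef
    have hbr : q * (P:Int) + r = m := by
      have := PySem.Int.floordiv_mul_add_mod m (P:Int); omega
    have hr0 : 0 ≤ r := PySem.Int.mod_nonneg m hPpos
    have hrP : r < (P:Int) := PySem.Int.mod_lt m hPpos
    set H : Nat := P / 2 with hHdef
    have hH1 : 1 ≤ H := by omega
    have hHlt : H < P := by omega
    have hhalf : PySem.Int.floordiv (P:Int) 2 = (H:Int) := by
      exact_mod_cast PySem.Int.floordiv_natCast P 2
    set L : Int := (H:Int) * q + min (H:Int) r with hLdef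
    -- unfold one step of dwGo
    rw [dwGo]
    rw [dif_neg (by omega), dif_neg (by exact_mod_cast (by omega : (P:Int) ≠ 1))]
    simp only [hhalf, ← hqdef, ← hrdef, ← hLdef]
    -- left subproblem divmod
    have hHpos : (0:Int) < (H:Int) := by exact_mod_cast hH1
    have hleft : PySem.Int.floordiv L (H:Int) = q + (if (H:Int) ≤ r then 1 else 0) ∧
        PySem.Int.mod L (H:Int) = (if (H:Int) ≤ r then 0 else r) := by
      by_cases hc : (H:Int) ≤ r
      · simp only [if_pos hc]
        exact pv_divmod_unique _ _ _ _ hHpos (by rw [hLdef]; rw [min_eq_left hc]; ring)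
          le_rfl hHpos
      · simp only [if_neg hc, add_zero]
        exact pv_divmod_unique _ _ _ _ hHpos (by rw [hLdef, min_eq_right (by omega)]; ring)
          hr0 (by omega)
    -- right subproblem divmod
    have hPH : (0:Int) < ((P - H : Nat):Int) := by push_cast; omega
    have hright : PySem.Int.floordiv (m - L) ((P-H:Nat):Int) = q ∧
        PySem.Int.mod (m - L) ((P-H:Nat):Int) = r - min (H:Int) r := by
      refine pv_divmod_unique _ _ _ _ hPH ?_ (by omega) ?_
      · rw [hLdef]; push_cast [Nat.cast_sub hHlt.le]; linear_combination -hbr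
      · push_cast [Nat.cast_sub hHlt.le]; omega
    have ihL := ih H hHlt hH1 s L
    have ihR := ih (P - H) (by omega) (by omega) (s + L) (m - L)
    have hcast : (P:Int) - (H:Int) = ((P - H : Nat):Int) := by push_cast [Nat.cast_sub hHlt.le]; ring
    rw [hcast, ihL, ihR]
    rw [hleft.1, hleft.2, hright.1, hright.2]
    -- merge the two filtered maps into one over range P
    have hsplit : List.range P = List.range H ++ (List.range (P - H)).map (H + ·) := by
      conv_lhs => rw [show P = H + (P - H) by omega]
      exact List.range_add
    rw [hsplit, List.map_append, List.filter_append, List.map_map]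
    congr 1
    · -- left halves agree pointwise on range H
      refine congrArg _ (List.map_congr_left ?_)
      intro j hj
      have hjH : j < H := List.mem_range.mp hj
      have key : ∀ k : Int, 0 ≤ k → k ≤ (H:Int) →
          pvBnd (q + if (H:Int) ≤ r then 1 else 0) (if (H:Int) ≤ r then 0 else r) k
            = pvBnd q r k := by
        intro k hk0 hkH
        by_cases hc : (H:Int) ≤ r
        · simp only [pvBnd, if_pos hc, mul_add, mul_one]
          omega
        · simp only [pvBnd, if_neg hc, add_zero]
      have h1 : (0:Int) ≤ (j:Int) := by positivity
      rw [key (j:Int) h1 (by exact_mod_cast hjH.le),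
          key ((j:Int)+1) (by omega) (by exact_mod_cast hjH)]
    · -- right halves agree pointwise
      refine congrArg _ (List.map_congr_left ?_)
      intro j hj
      have key : ∀ k : Int, 0 ≤ k →
          s + L + pvBnd q (r - min (H:Int) r) k = s + pvBnd q r ((H:Int) + k) := by
        intro k hk0
        simp only [pvBnd, hLdef, add_mul]
        omega
      have h1 : (0:Int) ≤ (j:Int) := by positivity
      simp only [Function.comp_def]
      push_cast
      rw [key (j:Int) h1, key ((j:Int)+1) (by omega)]
      ring_nf

theorem pv_main (t n : Int) (hn : n ≠ 0) : distribute_work t n = distribute_work_alt t n := by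
  unfold distribute_work distribute_work_alt
  rcases lt_or_gt_of_ne hn with hneg | hpos
  · rw [PySem.List.pyRange_one_eq_nil (by omega), dwGo, dif_pos (by omega : n ≤ 0)]
    rfl
  · obtain ⟨k, rfl⟩ := Int.eq_ofNat_of_zero_le hpos.le
    have hk1 : 1 ≤ k := by exact_mod_cast hpos
    rw [pv_dwGo_char k hk1 0 t]
    set b := PySem.Int.floordiv t (k:Int) with hbdef
    set r := PySem.Int.mod t (k:Int) with hrdef
    have hbr : b * (k:Int) + r = t := by
      have := PySem.Int.floordiv_mul_add_mod t (k:Int); omega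
    have hr0 : 0 ≤ r := PySem.Int.mod_nonneg t hpos
    have hrn : r < (k:Int) := PySem.Int.mod_lt t hpos
    rw [PySem.List.pyRange_one]
    have hk2 : ((k:Int) - 0).toNat = k := by omega
    rw [hk2]
    simp only [zero_add]
    rw [List.foldl_map]
    have hA := PySem.List.foldl_append_if
      (p := fun j : Nat => decide (min (((j:Int)+1) * b + min ((j:Int)+1) r) t > (j:Int) * b + min (j:Int) r))
      (f := fun j : Nat => (((j:Int) * b + min (j:Int) r), min (((j:Int)+1) * b + min ((j:Int)+1) r) t))
      (List.range k) []
    simp only [decide_eq_true_eq] at hA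
    rw [hA, List.filter_map]
    simp only [Function.comp_def, List.nil_append, pvBnd, zero_add]
    by_cases ht : 0 ≤ t
    · -- every boundary is ≤ t, so A's clamp min(·, total_items) is the identity
      have hb0 : 0 ≤ b := by
        rw [hbdef, PySem.Int.floordiv_eq_ediv_of_pos hpos]
        exact Int.ediv_nonneg ht (le_of_lt hpos)
      have hle : ∀ j : Nat, j < k → ((j:Int)+1) * b + min ((j:Int)+1) r ≤ t := by
        intro j hj
        have hjk : ((j:Int)+1) ≤ (k:Int) := by exact_mod_cast hj
        have h1 : ((j:Int)+1) * b ≤ (k:Int) * b := mul_le_mul_of_nonneg_right hjk hb0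
        have h2 : min ((j:Int)+1) r ≤ r := min_le_right _ _
        nlinarith
      rw [List.filter_congr (q := fun j : Nat =>
            decide ((j:Int) * b + min (j:Int) r < ((j:Int)+1) * b + min ((j:Int)+1) r))
          (by intro j hj
              simp only [List.mem_range] at hj
              simp [min_eq_left (hle j hj)])]
      refine List.map_congr_left ?_
      intro j hj
      have hjk := List.mem_range.mp (List.mem_of_mem_filter hj)
      push_cast
      simp [min_eq_left (hle j hjk)]
    · -- t < 0 : boundaries are non-increasing, both sides keep no pair
      have hbneg : b < 0 := by
        by_contra h
        push_neg at h
        nlinarith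
      have hmono : ∀ j : Nat, ((j:Int)+1) * b + min ((j:Int)+1) r ≤ (j:Int) * b + min (j:Int) r := by
        intro j
        have hprod : ((j:Int)+1) * b = (j:Int) * b + b := by ring
        have h1 : min ((j:Int)+1) r ≤ min (j:Int) r + 1 := by omega
        linarith
      rw [List.filter_eq_nil_iff.mpr (by
        intro j hj
        simp only [decide_eq_true_eq, not_lt]
        exact le_trans (min_le_left _ _) (hmono j))]
      rw [List.filter_eq_nil_iff.mpr (by
        intro j hj
        simp only [decide_eq_true_eq, not_lt]
        push_cast
        exact hmono j)]
      simp

-- ===== VERDICT =====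
theorem distribute_work_spec : Claim_equal_distribute_work := by
  intro t n _ hn
  exact pv_main t n hn
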